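-- pv_equiv track=rewrite | github.com/Chronona/PyCheckioSolutions | py_checkio_solutions/Electronic Station/sort_by_extension.py | sort_by_ext
-- ===== SOURCE A (Python) =====
-- from typing import List
--
-- def sort_by_ext(files: List[str]) -> List[str]:
--     file_dict = {}
--     no_name = []
--     for i in range(len(files)):
--         file = files[i].rsplit(".", 1)
--         name = file[0]
--         extension = file[1]
--         if name == "":
--             no_name.append("." + extension)
--             continue
--         file_dict[i] = [name, extension]
--     file_dict = sorted(file_dict.items(), key=lambda x: (x[1][1], x[1][0]))
--     result = [".".join(j) for i, j in file_dict]
--     if len(no_name) != 0: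
--         no_name.extend(result)
--         return no_name
--     return result
-- ===== SOURCE B (Python) =====
-- def sort_by_ext(files):
--     def sort_key(f):
--         parts = f.rsplit(".", 1)
--         name = parts[0]
--         ext = parts[1]
--         return ("", "") if name == "" else (ext, name)
--     return sorted(files, key=sort_key)
-- ===== Notes on version B (the rewrite author's own statement) =====
-- stated objective: simpler
-- what changed: Replaces the index-keyed dict, separate no-name list and string reconstruction with a single stable sorted() over the original strings using one key function (empty-name files get the minimal key, so stability keeps them first in input order).
import Mathlib
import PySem

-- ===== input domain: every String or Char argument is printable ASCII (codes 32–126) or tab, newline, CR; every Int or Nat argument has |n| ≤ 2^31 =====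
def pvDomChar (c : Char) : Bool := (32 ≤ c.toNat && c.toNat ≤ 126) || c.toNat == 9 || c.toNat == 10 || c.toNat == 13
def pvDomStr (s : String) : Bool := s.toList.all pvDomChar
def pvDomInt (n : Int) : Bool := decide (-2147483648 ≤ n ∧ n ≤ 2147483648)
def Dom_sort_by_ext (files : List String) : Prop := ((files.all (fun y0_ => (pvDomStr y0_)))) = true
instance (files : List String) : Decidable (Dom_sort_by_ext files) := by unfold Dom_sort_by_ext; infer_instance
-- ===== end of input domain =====

-- B replaces A's index-keyed dict + separate no-name list + string reconstruction by one
-- stable keyed sort over the original strings (objective: simpler).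

-- ===== PORT A =====
-- hand port of s.rsplit(".", 1) on the char list (PySem has no rsplit); exact: splits at the
-- last '.' if any, else returns the single piece
def pvRsplitDot1 (cs : List Char) : List (List Char) :=
  let p := cs.reverse.span (fun c => c != '.')
  if p.2.isEmpty then [cs] else [p.2.tail.reverse, p.1.reverse]

def sort_by_ext (files : List String) : List String :=
  let st := (PySem.List.pyRange 0 (PySem.List.len files) 1).foldl
    (fun (st : PySem.Dict Int (List (List Char)) × List String) i =>
      let file := pvRsplitDot1 (PySem.List.pyGetD files i "").toList
      let name := PySem.List.pyGetD file 0 []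
      let extension := PySem.List.pyGetD file 1 []
      if name = [] then (st.1, st.2 ++ [String.ofList ('.' :: extension)])
      else (st.1.insert i [name, extension], st.2))
    (PySem.Dict.empty, [])
  let fileDict := PySem.List.sorted2 st.1.items
      (fun x => String.ofList (PySem.List.pyGetD x.2 1 []))
      (fun x => String.ofList (PySem.List.pyGetD x.2 0 []))
  let result := fileDict.map (fun x => String.ofList (PySem.Chars.join ['.'] x.2))
  if st.2.length ≠ 0 then st.2 ++ result else result

-- ===== PORT B =====
def pvKey1 (f : String) : String :=
  let parts := pvRsplitDot1 f.toList
  if PySem.List.pyGetD parts 0 [] = [] then ""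
  else String.ofList (PySem.List.pyGetD parts 1 [])

def pvKey2 (f : String) : String :=
  let parts := pvRsplitDot1 f.toList
  if PySem.List.pyGetD parts 0 [] = [] then ""
  else String.ofList (PySem.List.pyGetD parts 0 [])

def sort_by_ext_alt (files : List String) : List String :=
  PySem.List.sorted2 files pvKey1 pvKey2

-- ===== PRECONDITION & SPEC =====
-- A raises IndexError (file[1]) on any string without a '.'; exactly those inputs are excluded.
def Pre_sort_by_ext (files : List String) : Prop := ∀ f ∈ files, '.' ∈ f.toList
instance (files : List String) : Decidable (Pre_sort_by_ext files) := by
  unfold Pre_sort_by_ext; infer_instance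

def pvWitness_sort_by_ext : List String := ["b.txt", ".cfg", "a.py", "a.txt"]

def Spec_sort_by_ext (files : List String) (out : List String) : Prop := out = sort_by_ext_alt files
instance (files : List String) (out : List String) : Decidable (Spec_sort_by_ext files out) := by unfold Spec_sort_by_ext; infer_instance

-- ===== CLAIM (what is proved, stated in full; the proofs are below) =====
def Claim_equal_sort_by_ext : Prop := ∀ (files : List String), Dom_sort_by_ext files → Pre_sort_by_ext files → Spec_sort_by_ext files (sort_by_ext files)

-- ===== LEMMAS AND PROOFS =====

-- abbreviations for the name / extension char lists produced by rsplit(".", 1)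
def pvNm (cs : List Char) : List Char := PySem.List.pyGetD (pvRsplitDot1 cs) 0 []
def pvEx (cs : List Char) : List Char := PySem.List.pyGetD (pvRsplitDot1 cs) 1 []

-- the comparison 'key(a) < key(b)' (Python tuple order) used by B's stable insertion sort
def pvBfr (a b : String) : Bool :=
  decide (pvKey1 a < pvKey1 b) || (!decide (pvKey1 b < pvKey1 a) && decide (pvKey2 a < pvKey2 b))

lemma pvDropWhile_ne_nil (cs : List Char) (h : '.' ∈ cs) :
    cs.reverse.dropWhile (fun c => c != '.') ≠ [] := by
  intro hn; rw [List.dropWhile_eq_nil_iff] at hn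
  have := hn '.' (by simpa using h); simp at this

lemma pvRsplit_parts (cs : List Char) (h : '.' ∈ cs) :
    pvRsplitDot1 cs = [(cs.reverse.dropWhile (fun c => c != '.')).tail.reverse,
                       (cs.reverse.takeWhile (fun c => c != '.')).reverse] := by
  simp [pvRsplitDot1, List.span_eq_takeWhile_dropWhile, List.isEmpty_iff, pvDropWhile_ne_nil cs h]

lemma pvDropWhile_cons (cs : List Char) (h : '.' ∈ cs) :
    cs.reverse.dropWhile (fun c => c != '.')
    = '.' :: (cs.reverse.dropWhile (fun c => c != '.')).tail := by
  have hne := pvDropWhile_ne_nil cs h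
  have hh := List.head_dropWhile_not (fun c => c != '.') hne
  simp only [bne_eq_false_iff_eq] at hh
  conv_lhs => rw [← List.cons_head_tail hne, hh]

lemma pvRecover (cs : List Char) (h : '.' ∈ cs) : pvNm cs ++ '.' :: pvEx cs = cs := by
  have hp := pvRsplit_parts cs h
  have hnm : pvNm cs = (cs.reverse.dropWhile (fun c => c != '.')).tail.reverse := by
    simp [pvNm, hp, PySem.List.pyGetD]
  have hex : pvEx cs = (cs.reverse.takeWhile (fun c => c != '.')).reverse := by
    simp [pvEx, hp, PySem.List.pyGetD]
  rw [hnm, hex]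
  conv_rhs => rw [← List.reverse_reverse cs,
    ← List.takeWhile_append_dropWhile (p := fun c => c != '.') (l := cs.reverse)]
  rw [List.reverse_append]
  conv_rhs => rw [pvDropWhile_cons cs h]
  simp

lemma pvKey1_named (f : String) (h : pvNm f.toList ≠ []) :
    pvKey1 f = String.ofList (pvEx f.toList) := by
  have h' : ¬ (PySem.List.pyGetD (pvRsplitDot1 f.toList) 0 [] = []) := by simpa [pvNm] using h
  simp [pvKey1, pvEx, h']

lemma pvKey2_named (f : String) (h : pvNm f.toList ≠ []) :
    pvKey2 f = String.ofList (pvNm f.toList) := by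
  have h' : ¬ (PySem.List.pyGetD (pvRsplitDot1 f.toList) 0 [] = []) := by simpa [pvNm] using h
  simp [pvKey2, pvNm, h']

lemma pvKey1_noname (f : String) (h : pvNm f.toList = []) : pvKey1 f = "" := by
  have h' : PySem.List.pyGetD (pvRsplitDot1 f.toList) 0 [] = [] := by simpa [pvNm] using h
  simp [pvKey1, h']

lemma pvKey2_noname (f : String) (h : pvNm f.toList = []) : pvKey2 f = "" := by
  have h' : PySem.List.pyGetD (pvRsplitDot1 f.toList) 0 [] = [] := by simpa [pvNm] using h
  simp [pvKey2, h']

lemma pvOfList_ne_empty (l : List Char) (h : l ≠ []) : String.ofList l ≠ "" := by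
  intro hc; have := congrArg String.toList hc; simp at this; exact h this

lemma pvEmpty_lt (s : String) (h : s ≠ "") : "" < s := by
  rw [String.lt_iff_toList_lt]
  cases hs : s.toList with
  | nil =>
      exact absurd (by rw [← @String.ofList_toList s, hs]) h
  | cons c t => exact List.nil_lt_cons c t

-- F1: two no-name files tie
lemma pvBfr_nn_nn (x y : String) (hx : pvNm x.toList = []) (hy : pvNm y.toList = []) :
    pvBfr x y = false := by
  simp [pvBfr, pvKey1_noname _ hx, pvKey1_noname _ hy, pvKey2_noname _ hx, pvKey2_noname _ hy]

-- F2: a no-name file sorts strictly before any named file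
lemma pvBfr_nn_named (x y : String) (hx : pvNm x.toList = []) (hy : pvNm y.toList ≠ []) :
    pvBfr x y = true := by
  have h2 : pvKey2 y ≠ "" := by
    rw [pvKey2_named y hy]; exact pvOfList_ne_empty _ hy
  simp [pvBfr, pvKey1_noname _ hx, pvKey2_noname _ hx, pvEmpty_lt _ h2]

-- F3: a named file never sorts before a no-name file
lemma pvBfr_named_nn (x y : String) (_hx : pvNm x.toList ≠ []) (hy : pvNm y.toList = []) :
    pvBfr x y = false := by
  simp [pvBfr, pvKey1_noname _ hy, pvKey2_noname _ hy]

-- insertBy facts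
lemma pvInsertBy_skip {α : Type} (b : α → α → Bool) (x : α) (l1 l2 : List α)
    (h : ∀ y ∈ l1, b x y = false) :
    PySem.List.insertBy b x (l1 ++ l2) = l1 ++ PySem.List.insertBy b x l2 := by
  induction l1 with
  | nil => rfl
  | cons y ys ih =>
      simp only [List.cons_append, PySem.List.insertBy, h y (by simp)]
      simp [ih (fun z hz => h z (by simp [hz]))]

lemma pvInsertBy_head {α : Type} (b : α → α → Bool) (x : α) (l : List α)
    (h : ∀ y ∈ l, b x y = true) : PySem.List.insertBy b x l = x :: l := by
  cases l with
  | nil => rfl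
  | cons y ys => simp [PySem.List.insertBy, h y (by simp)]

lemma pvMem_foldl_insertBy {α : Type} (b : α → α → Bool) :
    ∀ (l acc : List α) (x : α), x ∈ l.foldl (fun a e => PySem.List.insertBy b e a) acc →
      x ∈ acc ∨ x ∈ l := by
  intro l
  induction l with
  | nil => intro acc x h; exact Or.inl h
  | cons y ys ih =>
      intro acc x h
      rcases ih _ x h with h' | h'
      · rw [PySem.List.mem_insertBy] at h'
        rcases h' with rfl | h' <;> simp [*]
      · simp [h']

lemma pvInsertBy_congr {α : Type} (b1 b2 : α → α → Bool) (x : α) (l : List α)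
    (h : ∀ y ∈ l, b1 x y = b2 x y) :
    PySem.List.insertBy b1 x l = PySem.List.insertBy b2 x l := by
  induction l with
  | nil => rfl
  | cons y ys ih =>
      simp only [PySem.List.insertBy, h y (by simp)]
      rw [ih (fun z hz => h z (by simp [hz]))]

lemma pvFoldl_insertBy_congr {α : Type} (S : List α) (b1 b2 : α → α → Bool)
    (hb : ∀ a ∈ S, ∀ a' ∈ S, b1 a a' = b2 a a') :
    ∀ (l acc : List α), (∀ x ∈ l, x ∈ S) → (∀ x ∈ acc, x ∈ S) →
      l.foldl (fun a e => PySem.List.insertBy b1 e a) acc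
      = l.foldl (fun a e => PySem.List.insertBy b2 e a) acc := by
  intro l
  induction l with
  | nil => intro acc _ _; rfl
  | cons y ys ih =>
      intro acc hl hacc
      simp only [List.foldl_cons]
      rw [pvInsertBy_congr b1 b2 y acc (fun z hz => hb y (hl y (by simp)) z (hacc z hz))]
      exact ih _ (fun z hz => hl z (by simp [hz]))
        (fun z hz => by
          rw [PySem.List.mem_insertBy] at hz
          rcases hz with rfl | hz
          · exact hl z (by simp)
          · exact hacc z hz)

lemma pvInsertBy_map {α β : Type} (h : α → β) (b1 : β → β → Bool) (x : α) (l : List α) :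
    PySem.List.insertBy b1 (h x) (l.map h)
    = (PySem.List.insertBy (fun a a' => b1 (h a) (h a')) x l).map h := by
  induction l with
  | nil => rfl
  | cons y ys ih =>
      simp only [List.map_cons, PySem.List.insertBy]
      by_cases hc : b1 (h x) (h y) = true
      · simp [hc]
      · simp only [Bool.not_eq_true] at hc
        simp [hc, ih]

lemma pvFoldl_insertBy_map {α β : Type} (h : α → β) (b1 : β → β → Bool) :
    ∀ (l acc : List α),
      (l.map h).foldl (fun a e => PySem.List.insertBy b1 e a) (acc.map h)
      = (l.foldl (fun a e => PySem.List.insertBy (fun p q => b1 (h p) (h q)) e a) acc).map h := by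
  intro l
  induction l with
  | nil => intro acc; rfl
  | cons y ys ih =>
      intro acc
      simp only [List.map_cons, List.foldl_cons]
      rw [pvInsertBy_map h b1 y acc, ih]

-- the split of B's stable sort: no-name files (ties, minimal key) stay in front in input
-- order, named files are insertion-sorted behind them
lemma pvFoldl_split :
    ∀ (fs nn rest : List String), (∀ y ∈ nn, pvNm y.toList = []) → (∀ y ∈ rest, pvNm y.toList ≠ []) →
      fs.foldl (fun a e => PySem.List.insertBy pvBfr e a) (nn ++ rest)
      = (nn ++ fs.filter (fun f => decide (pvNm f.toList = [])))
        ++ (fs.filter (fun f => !decide (pvNm f.toList = []))).foldl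
             (fun a e => PySem.List.insertBy pvBfr e a) rest := by
  intro fs
  induction fs with
  | nil => intro nn rest _ _; simp
  | cons f fs ih =>
      intro nn rest hnn hrest
      simp only [List.foldl_cons]
      by_cases hf : pvNm f.toList = []
      · rw [pvInsertBy_skip pvBfr f nn rest (fun y hy => pvBfr_nn_nn f y hf (hnn y hy)),
            pvInsertBy_head pvBfr f rest (fun y hy => pvBfr_nn_named f y hf (hrest y hy))]
        have : nn ++ f :: rest = (nn ++ [f]) ++ rest := by simp
        rw [this, ih (nn ++ [f]) rest
              (by intro y hy; rcases List.mem_append.mp hy with h | h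
                  · exact hnn y h
                  · simp at h; subst h; exact hf) hrest]
        simp [hf]
      · rw [pvInsertBy_skip pvBfr f nn rest (fun y hy => pvBfr_named_nn f y hf (hnn y hy))]
        rw [ih nn (PySem.List.insertBy pvBfr f rest) hnn
              (by intro y hy; rw [PySem.List.mem_insertBy] at hy
                  rcases hy with rfl | hy
                  · exact hf
                  · exact hrest y hy)]
        simp [hf]

-- dict built with fresh strictly-increasing keys: every insert appends
lemma pvDict_items_fold :
    ∀ (l : List (Int × String)) (d : PySem.Dict Int (List (List Char))),
      (∀ p ∈ l, d.contains p.1 = false) → l.Pairwise (fun p q => p.1 ≠ q.1) →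
      (l.foldl (fun d e => if pvNm e.2.toList = [] then d
                           else d.insert e.1 [pvNm e.2.toList, pvEx e.2.toList]) d).items
      = d.items ++ (l.filter (fun e => !decide (pvNm e.2.toList = []))).map
          (fun e => (e.1, [pvNm e.2.toList, pvEx e.2.toList])) := by
  intro l
  induction l with
  | nil => intro d _ _; simp
  | cons e l ih =>
      intro d hd hpw
      by_cases he : pvNm e.2.toList = []
      · simp only [List.foldl_cons, if_pos he]
        rw [ih d (fun p hp => hd p (by simp [hp])) (List.Pairwise.sublist (by simp) hpw)]
        simp [he]
      · simp only [List.foldl_cons, if_neg he]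
        rw [ih (d.insert e.1 [pvNm e.2.toList, pvEx e.2.toList])
              (by intro p hp
                  rw [PySem.Dict.contains_insert]
                  have hne : p.1 ≠ e.1 :=
                    fun hc => (List.pairwise_cons.mp hpw).1 p hp hc.symm
                  simp [hne, hd p (by simp [hp])])
              (List.Pairwise.sublist (by simp) hpw)]
        rw [PySem.Dict.items_insert_of_not_contains d _ (hd e (by simp))]
        simp [he]

-- dropping the indices of a filtered enumeration
lemma pvFilter_map_enum {p : String → Bool} {g : String → String} :
    ∀ (xs : List String) (s : Int),
      (((PySem.List.enumerate xs s).filter (fun e => p e.2)).map (fun e => g e.2))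
      = (xs.filter p).map g := by
  intro xs
  induction xs with
  | nil => intro s; rfl
  | cons x t ih =>
      intro s
      rw [PySem.List.enumerate_cons]
      by_cases hx : p x = true <;> simp [hx, ih (s+1)]

-- the comparison used by A's sort of the dict items (the tuple key (x[1][1], x[1][0]))
def pvBfrA (x y : Int × List (List Char)) : Bool :=
  decide (String.ofList (PySem.List.pyGetD x.2 1 []) < String.ofList (PySem.List.pyGetD y.2 1 []))
  || (!decide (String.ofList (PySem.List.pyGetD y.2 1 []) < String.ofList (PySem.List.pyGetD x.2 1 []))
      && decide (String.ofList (PySem.List.pyGetD x.2 0 []) < String.ofList (PySem.List.pyGetD y.2 0 [])))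

-- the named (index, file) pairs, in input order
def pvNamed (files : List String) : List (Int × String) :=
  (PySem.List.enumerate files 0).filter (fun e => !decide (pvNm e.2.toList = []))

lemma pvSorted2_alt (files : List String) :
    sort_by_ext_alt files
    = files.foldl (fun a e => PySem.List.insertBy pvBfr e a) [] := rfl

lemma pvSorted2_A (l : List (Int × List (List Char))) :
    PySem.List.sorted2 l
      (fun x => String.ofList (PySem.List.pyGetD x.2 1 []))
      (fun x => String.ofList (PySem.List.pyGetD x.2 0 []))
    = l.foldl (fun a e => PySem.List.insertBy pvBfrA e a) [] := rfl

lemma pvMem_named (files : List String) (e : Int × String) (he : e ∈ pvNamed files) :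
    e.2 ∈ files ∧ pvNm e.2.toList ≠ [] := by
  rw [pvNamed, List.mem_filter] at he
  obtain ⟨he1, he2⟩ := he
  refine ⟨?_, by simp_all⟩
  rw [PySem.List.mem_enumerate_iff] at he1
  obtain ⟨k, hk, rfl⟩ := he1
  exact List.getElem_mem hk

-- A's loop body, as a function of the (index, file) pair
def pvStepA (st : PySem.Dict Int (List (List Char)) × List String) (e : Int × String) :
    PySem.Dict Int (List (List Char)) × List String :=
  if pvNm e.2.toList = [] then (st.1, st.2 ++ [String.ofList ('.' :: pvEx e.2.toList)])
  else (st.1.insert e.1 [pvNm e.2.toList, pvEx e.2.toList], st.2)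

-- A's loop, re-read over enumerate(files) and split into its two independent accumulators
lemma pvA_st (files : List String) :
    (PySem.List.pyRange 0 (PySem.List.len files) 1).foldl
      (fun (st : PySem.Dict Int (List (List Char)) × List String) i =>
        let file := pvRsplitDot1 (PySem.List.pyGetD files i "").toList
        let name := PySem.List.pyGetD file 0 []
        let extension := PySem.List.pyGetD file 1 []
        if name = [] then (st.1, st.2 ++ [String.ofList ('.' :: extension)])
        else (st.1.insert i [name, extension], st.2))
      (PySem.Dict.empty, [])
    = ((PySem.List.enumerate files 0).foldl
         (fun d e => if pvNm e.2.toList = [] then d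
                     else d.insert e.1 [pvNm e.2.toList, pvEx e.2.toList]) PySem.Dict.empty,
       (PySem.List.enumerate files 0).foldl
         (fun nn e => if pvNm e.2.toList = [] then nn ++ [String.ofList ('.' :: pvEx e.2.toList)]
                      else nn) []) := by
  have hb : (fun (st : PySem.Dict Int (List (List Char)) × List String) (i : Int) =>
      let file := pvRsplitDot1 (PySem.List.pyGetD files i "").toList
      let name := PySem.List.pyGetD file 0 []
      let extension := PySem.List.pyGetD file 1 []
      if name = [] then (st.1, st.2 ++ [String.ofList ('.' :: extension)])
      else (st.1.insert i [name, extension], st.2))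
      = (fun st i => pvStepA st ((fun j => (j, PySem.List.pyGetD files j "")) i)) := by
    funext st i
    simp only [pvStepA, pvNm, pvEx]
  rw [hb, ← List.foldl_map (f := fun j => (j, PySem.List.pyGetD files j "")) (g := pvStepA),
      ← PySem.List.enumerate_eq_map_pyRange files ""]
  have hcongr :
      List.foldl pvStepA (PySem.Dict.empty, ([] : List String)) (PySem.List.enumerate files 0)
      = List.foldl (fun (st : PySem.Dict Int (List (List Char)) × List String) (e : Int × String) =>
          ((fun d (e : Int × String) => if pvNm e.2.toList = [] then d
              else d.insert e.1 [pvNm e.2.toList, pvEx e.2.toList]) st.1 e,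
           (fun nn (e : Int × String) => if pvNm e.2.toList = [] then
              nn ++ [String.ofList ('.' :: pvEx e.2.toList)] else nn) st.2 e))
          (PySem.Dict.empty, []) (PySem.List.enumerate files 0) :=
    by
      apply PySem.List.foldl_congr_mem
      intro acc x _
      by_cases hx : pvNm x.2.toList = [] <;> simp [pvStepA, hx]
  rw [hcongr]
  exact PySem.List.foldl_prod_mk
    (fun d (e : Int × String) => if pvNm e.2.toList = [] then d
        else d.insert e.1 [pvNm e.2.toList, pvEx e.2.toList])
    (fun nn (e : Int × String) => if pvNm e.2.toList = [] then
        nn ++ [String.ofList ('.' :: pvEx e.2.toList)] else nn)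
    (PySem.List.enumerate files 0) PySem.Dict.empty []

-- A's no-name accumulator is the no-name files themselves, in input order
lemma pvA_prefix (files : List String) (hpre : Pre_sort_by_ext files) :
    (PySem.List.enumerate files 0).foldl
      (fun nn e => if pvNm e.2.toList = [] then nn ++ [String.ofList ('.' :: pvEx e.2.toList)]
                   else nn) []
    = files.filter (fun f => decide (pvNm f.toList = [])) := by
  rw [PySem.List.foldl_append_ite (p := fun (e : Int × String) => pvNm e.2.toList = [])
        (f := fun e => String.ofList ('.' :: pvEx e.2.toList))]
  rw [List.nil_append]
  rw [List.map_congr_left (g := fun (e : Int × String) => (fun (f : String) => f) e.2)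
      (fun e he => by
        rw [List.mem_filter] at he
        obtain ⟨he1, he2⟩ := he
        have he2' : pvNm e.2.toList = [] := by simpa using he2
        have hmem : e.2 ∈ files := by
          rw [PySem.List.mem_enumerate_iff] at he1
          obtain ⟨k, hk, rfl⟩ := he1
          exact List.getElem_mem hk
        have hrec := pvRecover e.2.toList (hpre e.2 hmem)
        rw [he2', List.nil_append] at hrec
        simp [hrec])]
  have h := pvFilter_map_enum (p := fun f => decide (pvNm f.toList = [])) (g := fun f => f) files 0
  simpa using h

-- A's dict items are exactly the named (index, [name, ext]) pairs, in input order
lemma pvA_items (files : List String) :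
    ((PySem.List.enumerate files 0).foldl
      (fun d e => if pvNm e.2.toList = [] then d
                  else d.insert e.1 [pvNm e.2.toList, pvEx e.2.toList]) PySem.Dict.empty).items
    = (pvNamed files).map (fun e => (e.1, [pvNm e.2.toList, pvEx e.2.toList])) := by
  rw [pvDict_items_fold (PySem.List.enumerate files 0) PySem.Dict.empty
        (fun p _ => rfl)
        ((PySem.List.pairwise_lt_enumerate files 0).imp (fun h => ne_of_lt h))]
  rw [pvNamed]
  rfl

-- both named-part sorts agree: A sorts the (index, [name, ext]) pairs and rebuilds the
-- strings, B sorts the strings; the comparisons coincide on named files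
lemma pvNamed_sort (files : List String) (hpre : Pre_sort_by_ext files) :
    (((pvNamed files).map (fun e => (e.1, [pvNm e.2.toList, pvEx e.2.toList]))).foldl
        (fun a e => PySem.List.insertBy pvBfrA e a) []).map
      (fun x => String.ofList (PySem.Chars.join ['.'] x.2))
    = (files.filter (fun f => !decide (pvNm f.toList = []))).foldl
        (fun a e => PySem.List.insertBy pvBfr e a) [] := by
  -- A side: pull the map out of the fold
  rw [show ([] : List (Int × List (List Char)))
        = ([] : List (Int × String)).map (fun e => (e.1, [pvNm e.2.toList, pvEx e.2.toList])) from rfl,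
      pvFoldl_insertBy_map (fun e => (e.1, [pvNm e.2.toList, pvEx e.2.toList])) pvBfrA
        (pvNamed files) []]
  -- B side: the named files are the second components of pvNamed
  have hfil : files.filter (fun f => !decide (pvNm f.toList = []))
      = (pvNamed files).map (fun e => e.2) := by
    have h := pvFilter_map_enum (p := fun f => !decide (pvNm f.toList = [])) (g := fun f => f) files 0
    rw [pvNamed]
    simpa using h.symm
  rw [hfil,
      show ([] : List String) = ([] : List (Int × String)).map (fun e => e.2) from rfl,
      pvFoldl_insertBy_map (fun (e : Int × String) => e.2) pvBfr (pvNamed files) []]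
  -- the two inner folds use the same comparison on named pairs
  rw [pvFoldl_insertBy_congr (pvNamed files)
        (fun p q => pvBfrA (p.1, [pvNm p.2.toList, pvEx p.2.toList]) (q.1, [pvNm q.2.toList, pvEx q.2.toList]))
        (fun p q => pvBfr p.2 q.2)
        (fun a ha a' ha' => by
          have h1 := (pvMem_named files a ha).2
          have h2 := (pvMem_named files a' ha').2
          simp [pvBfrA, pvBfr, pvKey1_named _ h1, pvKey1_named _ h2,
                pvKey2_named _ h1, pvKey2_named _ h2, pysem])
        (pvNamed files) [] (fun x hx => hx) (fun x hx => absurd hx (List.not_mem_nil))]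
  -- rebuild: ".".join([name, ext]) is the original string
  rw [List.map_map]
  apply List.map_congr_left
  intro e he
  rcases pvMem_foldl_insertBy _ (pvNamed files) [] e he with h | h
  · exact absurd h List.not_mem_nil
  · obtain ⟨hmem, _⟩ := pvMem_named files e h
    have hrec := pvRecover e.2.toList (hpre e.2 hmem)
    simp only [Function.comp]
    rw [show PySem.Chars.join ['.'] [pvNm e.2.toList, pvEx e.2.toList]
          = pvNm e.2.toList ++ '.' :: pvEx e.2.toList from by
        rw [PySem.Chars.join_cons_cons, PySem.Chars.join_singleton]; simp]
    rw [hrec, String.ofList_toList]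

-- ===== VERDICT (by name: the statement is the Claim_ definition above) =====
theorem sort_by_ext_spec : Claim_equal_sort_by_ext := by
  intro files _ hpre
  unfold Spec_sort_by_ext
  have hsplit := pvFoldl_split files [] [] (by simp) (by simp)
  simp only [List.nil_append, List.append_nil] at hsplit
  rw [pvSorted2_alt files, hsplit]
  simp only [sort_by_ext, pvA_st files]
  rw [pvA_prefix files hpre, pvA_items files, pvSorted2_A, pvNamed_sort files hpre]
  by_cases hlen : (files.filter (fun f => decide (pvNm f.toList = []))).length = 0
  · rw [List.length_eq_zero_iff] at hlen
    simp [hlen]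
  · simp [hlen]
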